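-- pv_equiv track=rewrite | github.com/Frigorifico9/AwesomeEncryption | trinaryTest.py | decimalToTrinary
-- ===== SOURCE A (Python) =====
-- def decimalToTrinary(n):
--     if n == 0:
--         return "0"
--
--     trinaryDigits = []
--     while n > 0:
--         trinaryDigits.append(str(n % 3))  # Get remainder
--         n //= 3  # Update number by integer division
--
--     return ''.join(reversed(trinaryDigits))  # Reverse to get correct order
-- ===== SOURCE B (Python) =====
-- def decimalToTrinary(n):
--     if n <= 0:
--         return "0" if n == 0 else ""
--     # find the largest power of 3 not exceeding n
--     p = 1
--     while p * 3 <= n: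
--         p *= 3
--     # emit digits most-significant first by dividing by descending powers
--     out = ""
--     while p > 0:
--         out += str(n // p)
--         n %= p
--         p //= 3
--     return out
-- ===== Notes on version B (the rewrite author's own statement) =====
-- stated objective: alternative
-- what changed: Instead of collecting remainders least-significant-first into a list and reversing, B first finds the largest power of 3 not exceeding n and then emits digits most-significant-first by dividing by descending powers, so no list and no reversal exist.
import Mathlib
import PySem

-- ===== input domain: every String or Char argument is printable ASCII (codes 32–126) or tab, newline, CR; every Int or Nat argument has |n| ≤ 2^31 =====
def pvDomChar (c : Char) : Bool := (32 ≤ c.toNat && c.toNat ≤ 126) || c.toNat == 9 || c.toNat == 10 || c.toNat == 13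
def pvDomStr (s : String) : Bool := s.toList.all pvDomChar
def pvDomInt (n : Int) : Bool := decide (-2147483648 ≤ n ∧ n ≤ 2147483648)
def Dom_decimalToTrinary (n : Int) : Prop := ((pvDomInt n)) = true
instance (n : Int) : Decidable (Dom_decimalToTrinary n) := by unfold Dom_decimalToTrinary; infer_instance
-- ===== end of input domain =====

-- B replaces A's remainder-list-then-reverse loop by a different algorithm: first find the
-- largest power of 3 not exceeding n, then emit digits most-significant-first by dividing
-- by descending powers (alternative decomposition; same asymptotic cost).

-- ===== PORT A =====
-- the while-loop: collects str(n % 3) in append order, recursing on n // 3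
def pvLoopA (n : Int) : List String :=
  if 0 < n then
    PySem.Int.toStr (PySem.Int.mod n 3) :: pvLoopA (PySem.Int.floordiv n 3)
  else []
termination_by n.toNat
decreasing_by
  rw [PySem.Int.floordiv_eq_ediv_of_pos (by omega : (0:Int) < 3)]
  omega

def decimalToTrinary (n : Int) : String :=
  if n = 0 then "0"
  else String.join (pvLoopA n).reverse

-- ===== PORT B =====
-- first loop: while p * 3 <= n: p *= 3   (the 0 < p conjunct only makes the recursion total;
-- B always calls it with p = 1)
def pvFindPow (n p : Int) : Int :=
  if 0 < p ∧ p * 3 ≤ n then pvFindPow n (p * 3) else p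
termination_by (n - p).toNat
decreasing_by omega

-- second loop: while p > 0: out += str(n // p); n %= p; p //= 3
def pvDigits (n p : Int) (out : String) : String :=
  if 0 < p then
    pvDigits (PySem.Int.mod n p) (PySem.Int.floordiv p 3)
      (out ++ PySem.Int.toStr (PySem.Int.floordiv n p))
  else out
termination_by p.toNat
decreasing_by
  rw [PySem.Int.floordiv_eq_ediv_of_pos (by omega : (0:Int) < 3)]
  omega

def decimalToTrinary_alt (n : Int) : String :=
  if n ≤ 0 then (if n = 0 then "0" else "")
  else pvDigits n (pvFindPow n 1) ""

-- ===== PRECONDITION & SPEC =====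
def Spec_decimalToTrinary (n : Int) (out : String) : Prop := out = decimalToTrinary_alt n
instance (n : Int) (out : String) : Decidable (Spec_decimalToTrinary n out) := by unfold Spec_decimalToTrinary; infer_instance

-- ===== CLAIM =====
def Claim_equal_decimalToTrinary : Prop := ∀ (n : Int), Dom_decimalToTrinary n → Spec_decimalToTrinary n (decimalToTrinary n)

-- ===== LEMMAS AND PROOFS =====

-- reference: fixed-width base-3 rendering, least-significant digit produced last
def pvPad : Nat → Int → String
  | 0, _ => ""
  | k+1, n => pvPad k (n / 3) ++ PySem.Int.toStr (n % 3)

theorem pv_foldl_append (l : List String) :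
    ∀ a : String, List.foldl (fun r s => r ++ s) a l = a ++ List.foldl (fun r s => r ++ s) "" l := by
  induction l with
  | nil => intro a; simp
  | cons b t ih =>
    intro a
    simp only [List.foldl]
    rw [ih (a ++ b), ih ("" ++ b), String.append_assoc]
    simp

theorem pv_join_append (l₁ l₂ : List String) :
    String.join (l₁ ++ l₂) = String.join l₁ ++ String.join l₂ := by
  simp only [String.join, List.foldl_append]
  exact pv_foldl_append l₂ _

-- A's loop produces exactly the fixed-width rendering when the width is exact
theorem pv_loopA_pad : ∀ (k : Nat) (n : Int), 3^k ≤ n → n < 3^(k+1) →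
    String.join (pvLoopA n).reverse = pvPad (k+1) n := by
  intro k
  induction k with
  | zero =>
    intro n h1 h2
    rw [pvLoopA]
    simp only [pow_zero] at h1 h2
    rw [if_pos (by omega : (0:Int) < n)]
    rw [PySem.Int.mod_eq_emod_of_pos (by omega : (0:Int) < 3),
        PySem.Int.floordiv_eq_ediv_of_pos (by omega : (0:Int) < 3)]
    have hz : n / 3 = 0 := by omega
    rw [hz, pvLoopA, if_neg (by omega : ¬ (0:Int) < 0)]
    simp [pvPad, String.join]
  | succ k ih =>
    intro n h1 h2
    rw [pvLoopA]
    have hn : (0:Int) < n := lt_of_lt_of_le (by positivity) h1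
    rw [if_pos hn]
    rw [PySem.Int.mod_eq_emod_of_pos (by omega : (0:Int) < 3),
        PySem.Int.floordiv_eq_ediv_of_pos (by omega : (0:Int) < 3)]
    have hlo : 3^k ≤ n / 3 := by
      rw [Int.le_ediv_iff_mul_le (by omega : (0:Int) < 3)]
      calc (3:Int)^k * 3 = 3^(k+1) := by ring
        _ ≤ n := h1
    have hhi : n / 3 < 3^(k+1) := by
      rw [Int.ediv_lt_iff_lt_mul (by omega : (0:Int) < 3)]
      calc n < 3^(k+2) := h2
        _ = 3^(k+1) * 3 := by ring
    have := ih (n / 3) hlo hhi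
    simp only [List.reverse_cons, pv_join_append, this]
    simp [pvPad, String.join]

-- splitting off the most significant digit of a fixed-width rendering
theorem pv_pad_split : ∀ (k : Nat) (n : Int), 0 ≤ n → n < 3^(k+2) →
    pvPad (k+2) n = PySem.Int.toStr (n / 3^(k+1)) ++ pvPad (k+1) (n % 3^(k+1)) := by
  intro k
  induction k with
  | zero =>
    intro n h0 h9
    have h9' : n < 9 := by norm_num at h9; omega
    show pvPad 1 (n/3) ++ PySem.Int.toStr (n % 3)
        = PySem.Int.toStr (n / 3^1) ++ pvPad 1 (n % 3^1)
    simp only [pvPad, pow_one]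
    have e2 : n / 3 % 3 = n / 3 := by omega
    have e3 : n % 3 % 3 = n % 3 := by omega
    rw [e2, e3]
    simp
  | succ k ih =>
    intro n h0 hb
    show pvPad (k+2) (n/3) ++ PySem.Int.toStr (n % 3) = _
    have hq0 : 0 ≤ n / 3 := Int.ediv_nonneg h0 (by omega)
    have hqb : n / 3 < 3^(k+2) := by
      rw [Int.ediv_lt_iff_lt_mul (by omega : (0:Int) < 3)]
      calc n < 3^(k+3) := hb
        _ = 3^(k+2) * 3 := by ring
    rw [ih (n/3) hq0 hqb]
    -- arithmetic identities
    have hd : n / 3 / 3^(k+1) = n / 3^(k+2) := by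
      rw [Int.ediv_ediv_of_nonneg (by omega : (0:Int) ≤ 3)]
      congr 1; ring
    have hm3 : n % 3^(k+2) % 3 = n % 3 :=
      Int.emod_emod_of_dvd n ⟨3^(k+1), by ring⟩
    have hmix : n / 3 % 3^(k+1) = n % 3^(k+2) / 3 := by
      have hq := Int.emod_def (n / 3) (3^(k+1))
      have hr := Int.emod_def n (3^(k+2))
      have : n % 3^(k+2) / 3 = n / 3 - 3^(k+1) * (n / 3^(k+2)) := by
        rw [hr]
        have : n - 3^(k+2) * (n / 3^(k+2)) = n + (-(3^(k+1) * (n / 3^(k+2)))) * 3 := by ring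
        rw [this, Int.add_mul_ediv_right _ _ (by omega : (3:Int) ≠ 0)]
        ring
      rw [hq, hd, this]
    rw [hd, hmix]
    show _ = PySem.Int.toStr (n / 3^(k+2)) ++ (pvPad (k+1) (n % 3^(k+2) / 3) ++ PySem.Int.toStr (n % 3^(k+2) % 3))
    rw [hm3, String.append_assoc]

-- B's digit loop produces the fixed-width rendering
theorem pv_digits_pad : ∀ (k : Nat) (n : Int) (out : String), 0 ≤ n → n < 3^(k+1) →
    pvDigits n (3^k) out = out ++ pvPad (k+1) n := by
  intro k
  induction k with
  | zero =>
    intro n out h0 h3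
    rw [pvDigits]
    simp only [pow_zero]
    rw [if_pos (by omega : (0:Int) < 1)]
    rw [PySem.Int.mod_eq_emod_of_pos (by omega : (0:Int) < 1),
        PySem.Int.floordiv_eq_ediv_of_pos (by omega : (0:Int) < 3),
        PySem.Int.floordiv_eq_ediv_of_pos (by omega : (0:Int) < 1)]
    have e1 : (1:Int) / 3 = 0 := by omega
    have e2 : n / 1 = n := Int.ediv_one n
    rw [e1, e2, pvDigits, if_neg (by omega : ¬ (0:Int) < 0)]
    norm_num at h3
    have e3 : n % 3 = n := by omega
    show out ++ PySem.Int.toStr n = out ++ pvPad 1 n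
    rw [show pvPad 1 n = pvPad 0 (n / 3) ++ PySem.Int.toStr (n % 3) from rfl, e3]
    simp [pvPad]
  | succ k ih =>
    intro n out h0 hb
    rw [pvDigits]
    rw [if_pos (by positivity : (0:Int) < 3^(k+1))]
    rw [PySem.Int.mod_eq_emod_of_pos (by positivity : (0:Int) < 3^(k+1)),
        PySem.Int.floordiv_eq_ediv_of_pos (by omega : (0:Int) < 3),
        PySem.Int.floordiv_eq_ediv_of_pos (by positivity : (0:Int) < 3^(k+1))]
    have hp : (3:Int)^(k+1) / 3 = 3^k := by
      rw [pow_succ, Int.mul_ediv_cancel _ (by omega : (3:Int) ≠ 0)]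
    rw [hp]
    have hm0 : 0 ≤ n % 3^(k+1) := Int.emod_nonneg n (by positivity : ((3:Int)^(k+1)) ≠ 0)
    have hmb : n % 3^(k+1) < 3^(k+1) := Int.emod_lt_of_pos n (by positivity)
    rw [ih (n % 3^(k+1)) _ hm0 hmb]
    rw [pv_pad_split k n h0 hb, String.append_assoc]

-- the power-finding loop returns the largest power of 3 not exceeding n
theorem pvFindPow_spec (n p : Int) (hp : 0 < p) (hpn : p ≤ n) :
    ∃ k : Nat, pvFindPow n p = p * 3^k ∧ p * 3^k ≤ n ∧ n < p * 3^(k+1) := by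
  rw [pvFindPow]
  by_cases h : p * 3 ≤ n
  · rw [if_pos ⟨hp, h⟩]
    obtain ⟨k, h1, h2, h3⟩ := pvFindPow_spec n (p * 3) (by omega) h
    refine ⟨k + 1, ?_, ?_, ?_⟩
    · rw [h1]; ring
    · calc p * 3^(k+1) = p * 3 * 3^k := by ring
        _ ≤ n := h2
    · calc n < p * 3 * 3^(k+1) := h3
        _ = p * 3^(k+2) := by ring
  · rw [if_neg (by tauto)]
    exact ⟨0, by ring, by simpa using hpn, by simpa using h⟩
termination_by (n - p).toNat
decreasing_by omega

-- ===== VERDICT =====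
theorem decimalToTrinary_spec : Claim_equal_decimalToTrinary := by
  intro n _
  unfold Spec_decimalToTrinary decimalToTrinary decimalToTrinary_alt
  by_cases h0 : n = 0
  · simp [h0]
  · by_cases hneg : n ≤ 0
    · rw [if_neg h0, if_pos hneg, if_neg h0, pvLoopA, if_neg (by omega)]
      simp [String.join]
    · rw [if_neg h0, if_neg hneg]
      obtain ⟨k, hfp, hlo, hhi⟩ := pvFindPow_spec n 1 (by omega) (by omega)
      rw [hfp]
      simp only [one_mul] at hfp hlo hhi ⊢
      rw [pv_digits_pad k n "" (by omega) hhi]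
      rw [pv_loopA_pad k n hlo hhi]
      simp
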